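-- pv_equiv track=rewrite | github.com/NaamaMika/boss-sniffer | step2_manager.py | indexs_ip
-- ===== SOURCE A (Python) =====
-- def indexs_ip(update_html_code):
--     """Find two indexs to set the information of the ips
--     :param update_html_code: html code
--     :return: two indexs
--     """
--     index_keys = 0
--     index_values = 0
--     for i in range(len(update_html_code)):
--         if "labels: %%IPS_KEYS%%" in update_html_code[i]:
--             index_keys = i
--         if "data: %%IPS_VALUES%%" in update_html_code[i]:
--             index_values = i
--     return index_keys, index_values
-- ===== SOURCE B (Python) =====
-- def indexs_ip(update_html_code):
--     """Find two indexs to set the information of the ips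
--     :param update_html_code: html code
--     :return: two indexs
--     """
--     def find_last(marker):
--         for i in range(len(update_html_code) - 1, -1, -1):
--             if marker in update_html_code[i]:
--                 return i
--         return 0
--     return (find_last("labels: %%IPS_KEYS%%"),
--             find_last("data: %%IPS_VALUES%%"))
-- ===== Notes on version B (the rewrite author's own statement) =====
-- stated objective: alternative
-- what changed: One combined forward pass updating two accumulators is replaced by two independent backward scans, each stopping at the first (i.e. last) line containing its marker, with default 0.
import Mathlib
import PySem

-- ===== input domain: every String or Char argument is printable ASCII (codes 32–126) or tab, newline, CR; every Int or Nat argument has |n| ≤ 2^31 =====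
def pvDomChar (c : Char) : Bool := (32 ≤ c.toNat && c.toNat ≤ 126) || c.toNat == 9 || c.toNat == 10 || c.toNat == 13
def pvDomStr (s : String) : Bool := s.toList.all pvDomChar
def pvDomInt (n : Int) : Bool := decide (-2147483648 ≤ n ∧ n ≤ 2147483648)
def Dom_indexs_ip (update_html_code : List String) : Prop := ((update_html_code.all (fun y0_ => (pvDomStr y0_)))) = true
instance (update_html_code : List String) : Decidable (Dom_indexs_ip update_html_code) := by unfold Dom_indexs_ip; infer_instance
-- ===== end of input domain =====

-- B replaces A's single forward pass with two independent backward scans (first hit from the end = last hit), default 0; same output.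

-- ===== PORT A =====
def indexs_ip (update_html_code : List String) : Int × Int :=
  (PySem.List.pyRange 0 (update_html_code.length : Int) 1).foldl
    (fun s i =>
      (if PySem.Str.isIn "labels: %%IPS_KEYS%%" (PySem.List.pyGetD update_html_code i "") then i else s.1,
       if PySem.Str.isIn "data: %%IPS_VALUES%%" (PySem.List.pyGetD update_html_code i "") then i else s.2))
    (0, 0)

-- ===== PORT B =====
-- Source B's inner 'find_last': scan i from len-1 down to 0, return the first i whose line contains the marker, else 0
def findLastIdx (marker : String) (xs : List String) : Int :=
  ((PySem.List.pyRange ((xs.length : Int) - 1) (-1) (-1)).find?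
      (fun i => PySem.Str.isIn marker (PySem.List.pyGetD xs i ""))).getD 0

def indexs_ip_alt (update_html_code : List String) : Int × Int :=
  (findLastIdx "labels: %%IPS_KEYS%%" update_html_code,
   findLastIdx "data: %%IPS_VALUES%%" update_html_code)

-- ===== PRECONDITION & SPEC =====
def Spec_indexs_ip (update_html_code : List String) (out : Int × Int) : Prop := out = indexs_ip_alt update_html_code
instance (update_html_code : List String) (out : Int × Int) : Decidable (Spec_indexs_ip update_html_code out) := by unfold Spec_indexs_ip; infer_instance

-- ===== CLAIM (what is proved, stated in full; the proofs are below) =====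
def Claim_equal_indexs_ip : Prop := ∀ (update_html_code : List String), Dom_indexs_ip update_html_code → Spec_indexs_ip update_html_code (indexs_ip update_html_code)

-- ===== LEMMAS AND PROOFS =====

-- last-match fold = first match of the reversed list
theorem foldl_last_match (q : Int → Bool) (l : List Int) (a : Int) :
    l.foldl (fun acc i => if q i then i else acc) a = (l.reverse.find? q).getD a := by
  induction l using List.reverseRecOn with
  | nil => simp
  | append_singleton l x ih =>
      rw [List.foldl_append]
      simp only [List.foldl_cons, List.foldl_nil, List.reverse_append, List.reverse_singleton,
        List.singleton_append, List.find?]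
      cases h : q x with
      | true => simp
      | false => simp [ih]

theorem findLastIdx_eq (marker : String) (xs : List String) :
    findLastIdx marker xs =
      (PySem.List.pyRange 0 (xs.length : Int) 1).foldl
        (fun acc i => if PySem.Str.isIn marker (PySem.List.pyGetD xs i "") then i else acc) 0 := by
  unfold findLastIdx
  have h : PySem.List.pyRange ((xs.length : Int) - 1) (-1) (-1)
      = (PySem.List.pyRange 0 (xs.length : Int) 1).reverse := by
    rw [PySem.List.pyRange_neg_one_eq_reverse]
    norm_num
  rw [h, foldl_last_match]

-- ===== VERDICT (by name: the statement is the Claim_ definition above) =====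
theorem indexs_ip_spec : Claim_equal_indexs_ip := by
  intro xs _
  unfold Spec_indexs_ip indexs_ip indexs_ip_alt
  rw [PySem.List.foldl_prod_mk
    (f := fun acc i => if PySem.Str.isIn "labels: %%IPS_KEYS%%" (PySem.List.pyGetD xs i "") then i else acc)
    (g := fun acc i => if PySem.Str.isIn "data: %%IPS_VALUES%%" (PySem.List.pyGetD xs i "") then i else acc),
    findLastIdx_eq, findLastIdx_eq]
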